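-- pv_equiv track=rewrite | github.com/nymbayr0206/drive-inguumel | delivery_pipeline_edits/backend/auth_capabilities.py | get_primary_role
-- ===== SOURCE A (Python) =====
-- from collections.abc import Iterable
--
-- PRIMARY_ROLE_PRIORITY = ("admin", "cashier", "driver", "warehouse_owner", "staff", "customer")
--
-- def get_primary_role(roles: Iterable[str], app_context: str | None) -> str:
--     """
--     primary_role selection:
--     - If app_context == "driver" and user has driver capability -> "driver"
--     - If app_context == "cashier" and user has cashier capability -> "cashier"
--     - Else default priority: admin > cashier > driver > warehouse_owner > staff > customer
--     """
--     r = list(roles) if roles else []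
--     if not r:
--         return "customer"
--     if app_context == "driver" and "driver" in r:
--         return "driver"
--     if app_context == "cashier" and "cashier" in r:
--         return "cashier"
--     for role in PRIMARY_ROLE_PRIORITY:
--         if role in r:
--             return role
--     return r[0]
-- ===== SOURCE B (Python) =====
-- PRIMARY_ROLE_PRIORITY = ("admin", "cashier", "driver", "warehouse_owner", "staff", "customer")
--
-- def get_primary_role(roles, app_context):
--     r = list(roles) if roles else []
--     if not r:
--         return "customer"
--     # a single ranking that already encodes the app_context preference:
--     # the context role (driver/cashier) gets rank -1, beating every priority rank.
--     def key(x):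
--         if app_context in ("driver", "cashier") and x == app_context:
--             return -1
--         try:
--             return PRIMARY_ROLE_PRIORITY.index(x)
--         except ValueError:
--             return len(PRIMARY_ROLE_PRIORITY)
--     best = r[0]
--     for x in r[1:]:
--         if key(x) < key(best):
--             best = x
--     return best
-- ===== Notes on version B (the rewrite author's own statement) =====
-- stated objective: alternative
-- what changed: Removes the two app_context guard returns and the scan over the priority tuple: B builds one ranking key that assigns the matched context role rank -1 and other roles their priority index (6 if absent), then selects the first minimal-key role in a single explicit min-loop over the roles.
import Mathlib
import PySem

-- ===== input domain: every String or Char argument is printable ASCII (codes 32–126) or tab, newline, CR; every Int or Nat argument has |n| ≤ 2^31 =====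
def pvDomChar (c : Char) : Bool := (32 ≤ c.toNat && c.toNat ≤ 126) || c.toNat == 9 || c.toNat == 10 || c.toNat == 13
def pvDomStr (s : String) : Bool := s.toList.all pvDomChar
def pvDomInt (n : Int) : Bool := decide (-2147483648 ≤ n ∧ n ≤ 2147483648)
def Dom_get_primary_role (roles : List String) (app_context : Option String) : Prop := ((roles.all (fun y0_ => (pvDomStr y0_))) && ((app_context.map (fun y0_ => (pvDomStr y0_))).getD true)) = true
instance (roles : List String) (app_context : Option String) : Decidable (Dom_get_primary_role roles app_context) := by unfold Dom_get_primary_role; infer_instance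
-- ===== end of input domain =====

-- B replaces A's two guard returns and priority-tuple scan by one ranking key (context role gets -1) and a single min-loop over the roles (alternative decomposition, same behaviour).

def PRIMARY_ROLE_PRIORITY : List String :=
  ["admin", "cashier", "driver", "warehouse_owner", "staff", "customer"]

-- ===== PORT A =====
def get_primary_role (roles : List String) (app_context : Option String) : String :=
  match roles with
  | [] => "customer"
  | x :: xs =>
    let r := x :: xs
    if app_context = some "driver" ∧ "driver" ∈ r then "driver"
    else if app_context = some "cashier" ∧ "cashier" ∈ r then "cashier"
    else
      -- the for-loop over PRIMARY_ROLE_PRIORITY with early return, then the r[0] fallback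
      match PRIMARY_ROLE_PRIORITY.find? (fun role => decide (role ∈ r)) with
      | some role => role
      | none => x

-- ===== PORT B =====
-- key(x): -1 for the matched context role, else PRIMARY_ROLE_PRIORITY.index(x), else 6
def pvKey (app_context : Option String) (x : String) : Int :=
  if (app_context = some "driver" ∨ app_context = some "cashier") ∧ some x = app_context then -1
  else
    match PySem.List.index? PRIMARY_ROLE_PRIORITY x with
    | some i => (i : Int)
    | none => 6

def get_primary_role_alt (roles : List String) (app_context : Option String) : String :=
  match roles with
  | [] => "customer"
  | x :: xs =>
    -- best = r[0]; for y in r[1:]: if key(y) < key(best): best = y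
    xs.foldl (fun best y => if pvKey app_context y < pvKey app_context best then y else best) x

-- ===== PRECONDITION & SPEC =====
def Spec_get_primary_role (roles : List String) (app_context : Option String) (out : String) : Prop := out = get_primary_role_alt roles app_context
instance (roles : List String) (app_context : Option String) (out : String) : Decidable (Spec_get_primary_role roles app_context out) := by unfold Spec_get_primary_role; infer_instance

-- ===== CLAIM (what is proved, stated in full; the proofs are below) =====
def Claim_equal_get_primary_role : Prop := ∀ (roles : List String) (app_context : Option String), Dom_get_primary_role roles app_context → Spec_get_primary_role roles app_context (get_primary_role roles app_context)

-- ===== LEMMAS AND PROOFS =====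

-- priority rank as a plain nested if, for reasoning
def rk (s : String) : Int :=
  if s = "admin" then 0 else if s = "cashier" then 1 else if s = "driver" then 2
  else if s = "warehouse_owner" then 3 else if s = "staff" then 4
  else if s = "customer" then 5 else 6

lemma index_eq_rk (s : String) :
    (match PySem.List.index? PRIMARY_ROLE_PRIORITY s with
      | some i => (i : Int)
      | none => 6) = rk s := by
  by_cases h1 : s = "admin" <;> by_cases h2 : s = "cashier" <;> by_cases h3 : s = "driver" <;>
    by_cases h4 : s = "warehouse_owner" <;> by_cases h5 : s = "staff" <;> by_cases h6 : s = "customer" <;>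
    first
    | (subst_vars; decide)
    | (rw [(PySem.List.index?_eq_none_iff _ _).mpr (by simp [PRIMARY_ROLE_PRIORITY, h1, h2, h3, h4, h5, h6])]
       simp [rk, h1, h2, h3, h4, h5, h6])

lemma rk_nonneg (s : String) : 0 ≤ rk s := by unfold rk; split_ifs <;> omega

lemma rk_le_six (s : String) : rk s ≤ 6 := by unfold rk; split_ifs <;> omega

lemma rk_lt_six_mem {s : String} (h : rk s < 6) : s ∈ PRIMARY_ROLE_PRIORITY := by
  unfold rk at h
  simp only [PRIMARY_ROLE_PRIORITY]
  split_ifs at h <;> simp_all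

lemma rk_inj {s t : String} (hs : s ∈ PRIMARY_ROLE_PRIORITY) (ht : t ∈ PRIMARY_ROLE_PRIORITY)
    (h : rk s = rk t) : s = t := by
  fin_cases hs <;> fin_cases ht <;> simp_all [rk]

lemma key_eq_rk {ctx : Option String} {s : String}
    (h : ¬ ((ctx = some "driver" ∨ ctx = some "cashier") ∧ some s = ctx)) :
    pvKey ctx s = rk s := by
  rw [pvKey, if_neg h, index_eq_rk]

lemma key_lb (ctx : Option String) (s : String) : -1 ≤ pvKey ctx s := by
  unfold pvKey
  split_ifs with h
  · omega
  · rw [index_eq_rk]; have := rk_nonneg s; omega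

lemma key_neg_one {ctx : Option String} {s : String} (h : pvKey ctx s = -1) : some s = ctx := by
  unfold pvKey at h
  split_ifs at h with hc
  · exact hc.2
  · rw [index_eq_rk] at h; have := rk_nonneg s; omega

-- the running min-by-key loop
def bestK (k : String → Int) (b : String) (xs : List String) : String :=
  xs.foldl (fun m x => if k x < k m then x else m) b

lemma bestK_spec (k : String → Int) (xs : List String) : ∀ b : String,
    bestK k b xs ∈ b :: xs ∧ (∀ y ∈ b :: xs, k (bestK k b xs) ≤ k y) ∧
    (k (bestK k b xs) = k b → bestK k b xs = b) := by
  induction xs with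
  | nil => intro b; simp [bestK]
  | cons x t ih =>
    intro b
    by_cases hx : k x < k b
    · have hstep : bestK k b (x :: t) = bestK k x t := by simp [bestK, hx]
      obtain ⟨hmem, hmin, hfirst⟩ := ih x
      have hle : k (bestK k x t) ≤ k x := hmin x (by simp)
      rw [hstep]
      refine ⟨List.mem_cons_of_mem b hmem, ?_, ?_⟩
      · intro y hy
        rcases List.mem_cons.mp hy with rfl | hy'
        · omega
        · exact hmin y hy'
      · intro h; exact absurd h (by omega)
    · have hstep : bestK k b (x :: t) = bestK k b t := by simp [bestK, hx]
      obtain ⟨hmem, hmin, hfirst⟩ := ih b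
      have hle : k (bestK k b t) ≤ k b := hmin b (by simp)
      rw [hstep]
      refine ⟨?_, ?_, hfirst⟩
      · rcases List.mem_cons.mp hmem with h | h
        · rw [h]; simp
        · exact List.mem_cons_of_mem _ (List.mem_cons_of_mem _ h)
      · intro y hy
        rcases List.mem_cons.mp hy with rfl | hy'
        · omega
        · rcases List.mem_cons.mp hy' with rfl | hy''
          · omega
          · exact hmin y (List.mem_cons_of_mem _ hy'')

lemma bestK_congr (k1 k2 : String → Int) (xs : List String) : ∀ b : String,
    (∀ s ∈ b :: xs, k1 s = k2 s) → bestK k1 b xs = bestK k2 b xs := by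
  induction xs with
  | nil => intro b _; rfl
  | cons x t ih =>
    intro b h
    have hx : k1 x = k2 x := h x (by simp)
    have hb : k1 b = k2 b := h b (by simp)
    have hxt : ∀ s ∈ x :: t, k1 s = k2 s := fun s hs => h s (List.mem_cons_of_mem _ hs)
    have hbt : ∀ s ∈ b :: t, k1 s = k2 s := by
      intro s hs
      rcases List.mem_cons.mp hs with rfl | hs'
      · exact hb
      · exact h s (List.mem_cons_of_mem _ (List.mem_cons_of_mem _ hs'))
    by_cases hc : k2 x < k2 b
    · rw [show bestK k1 b (x :: t) = bestK k1 x t by simp [bestK, hx, hb, hc],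
          show bestK k2 b (x :: t) = bestK k2 x t by simp [bestK, hc]]
      exact ih x hxt
    · rw [show bestK k1 b (x :: t) = bestK k1 b t by simp [bestK, hx, hb, hc],
          show bestK k2 b (x :: t) = bestK k2 b t by simp [bestK, hc]]
      exact ih b hbt

-- the for-loop over the literal priority list: what find? returns
lemma findP_spec (r : List String) :
    (∀ p, PRIMARY_ROLE_PRIORITY.find? (fun role => decide (role ∈ r)) = some p →
      p ∈ PRIMARY_ROLE_PRIORITY ∧ p ∈ r ∧ ∀ q ∈ PRIMARY_ROLE_PRIORITY, q ∈ r → rk p ≤ rk q) ∧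
    (PRIMARY_ROLE_PRIORITY.find? (fun role => decide (role ∈ r)) = none →
      ∀ q ∈ PRIMARY_ROLE_PRIORITY, q ∉ r) := by
  simp only [PRIMARY_ROLE_PRIORITY, List.find?]
  by_cases h1 : "admin" ∈ r <;> by_cases h2 : "cashier" ∈ r <;> by_cases h3 : "driver" ∈ r <;>
    by_cases h4 : "warehouse_owner" ∈ r <;> by_cases h5 : "staff" ∈ r <;> by_cases h6 : "customer" ∈ r <;>
    simp_all <;> decide

-- the no-guard case: A's find?/fallback equals the min-by-rk loop
lemma core_eq (x : String) (xs : List String) :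
    (match PRIMARY_ROLE_PRIORITY.find? (fun role => decide (role ∈ x :: xs)) with
      | some role => role
      | none => x) = bestK rk x xs := by
  obtain ⟨hmem, hmin, hfirst⟩ := bestK_spec rk xs x
  obtain ⟨hsome, hnone⟩ := findP_spec (x :: xs)
  cases hf : PRIMARY_ROLE_PRIORITY.find? (fun role => decide (role ∈ x :: xs)) with
  | none =>
    have hq := hnone hf
    have hb6 : rk (bestK rk x xs) = 6 := by
      have h6 := rk_le_six (bestK rk x xs)
      rcases lt_or_eq_of_le h6 with h | h
      · exact absurd hmem (by intro hm; exact hq _ (rk_lt_six_mem h) hm)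
      · exact h
    have hx6 : rk x = 6 := by
      have h6 := rk_le_six x
      rcases lt_or_eq_of_le h6 with h | h
      · exact absurd (show x ∈ x :: xs by simp) (by intro hm; exact hq _ (rk_lt_six_mem h) hm)
      · exact h
    simp [hfirst (by omega)]
  | some p =>
    obtain ⟨hpP, hpr, hpmin⟩ := hsome p hf
    have h1 : rk (bestK rk x xs) ≤ rk p := hmin p hpr
    have hplt : rk p < 6 := by fin_cases hpP <;> decide
    have hbP : bestK rk x xs ∈ PRIMARY_ROLE_PRIORITY := rk_lt_six_mem (by omega)
    have h2 : rk p ≤ rk (bestK rk x xs) := hpmin _ hbP hmem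
    simp [rk_inj hpP hbP (by omega)]

-- a context-guard case: the min-by-key loop returns the context role
lemma guard_case (ctx : Option String) (c x : String) (xs : List String)
    (hc : ctx = some c) (hmemc : c ∈ x :: xs)
    (hcd : ctx = some "driver" ∨ ctx = some "cashier") :
    bestK (pvKey ctx) x xs = c := by
  obtain ⟨hmem, hmin, _⟩ := bestK_spec (pvKey ctx) xs x
  have hkc : pvKey ctx c = -1 := by
    unfold pvKey; rw [if_pos ⟨hcd, by rw [hc]⟩]
  have h1 : pvKey ctx (bestK (pvKey ctx) x xs) ≤ -1 := by
    have := hmin c hmemc; omega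
  have h2 := key_lb ctx (bestK (pvKey ctx) x xs)
  have h3 : some (bestK (pvKey ctx) x xs) = ctx :=
    key_neg_one (ctx := ctx) (s := bestK (pvKey ctx) x xs) (by omega)
  exact Option.some.inj (h3.trans hc)

lemma guards_eq (roles : List String) (app_context : Option String) :
    get_primary_role roles app_context = get_primary_role_alt roles app_context := by
  cases roles with
  | nil => rfl
  | cons x xs =>
    show get_primary_role (x :: xs) app_context = bestK (pvKey app_context) x xs
    simp only [get_primary_role]
    split_ifs with h1 h2
    · exact (guard_case app_context "driver" x xs h1.1 h1.2 (Or.inl h1.1)).symm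
    · exact (guard_case app_context "cashier" x xs h2.1 h2.2 (Or.inr h2.1)).symm
    · rw [core_eq x xs]
      refine (bestK_congr (pvKey app_context) rk xs x (fun s hs => key_eq_rk ?_)).symm ▸ rfl
      rintro ⟨hcd, hse⟩
      rcases hcd with hd | hc
      · exact h1 ⟨hd, by rw [hd] at hse; injection hse with h; rw [← h]; exact hs⟩
      · exact h2 ⟨hc, by rw [hc] at hse; injection hse with h; rw [← h]; exact hs⟩

-- ===== VERDICT (by name: the statement is the Claim_ definition above) =====
theorem get_primary_role_spec : Claim_equal_get_primary_role := by
  intro roles app_context _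
  unfold Spec_get_primary_role
  exact guards_eq roles app_context
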